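-- pv_equiv track=rewrite | github.com/henrypy246/LearnToCode | python/T3H/Lec04/Homework/excercise03.py | canChi
-- ===== SOURCE A (Python) =====
-- def canChi(year):
-- 	can = ['giáp', 'ất', 'bính', 'đinh', 'mậu', 'kỷ', 'canh', 'tân', 'nhâm', 'quý']
-- 	chi = ['tý', 'sửu', 'dần', 'mão', 'thìn', 'tị', 'ngọ', 'mùi', 'thân', 'dậu', 'tuất', 'hợi']
-- 	i = 0
-- 	j = 0
-- 	can_chi = []
-- 	for x in range(60):
-- 		if i == 10: i = 0
-- 		if j == 12: j = 0
-- 		can_chi.append((can[i][0].upper()+ can[i][1:],chi[j][0].upper()+chi[j][1:]))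
-- 		i+=1
-- 		j+=1
-- 	c = (year-3) %60 -1
-- 	print (year, can_chi[c][0]+' '+can_chi[c][1])
-- 	return (year, can_chi[c][0]+' '+can_chi[c][1])
-- ===== SOURCE B (Python) =====
-- def canChi(year):
-- 	can = ['Giáp', 'Ất', 'Bính', 'Đinh', 'Mậu', 'Kỷ', 'Canh', 'Tân', 'Nhâm', 'Quý']
-- 	chi = ['Tý', 'Sửu', 'Dần', 'Mão', 'Thìn', 'Tị', 'Ngọ', 'Mùi', 'Thân', 'Dậu', 'Tuất', 'Hợi']
-- 	c = (year - 3) % 60 - 1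
-- 	name = can[c % 10] + ' ' + chi[c % 12]
-- 	print(year, name)
-- 	return (year, name)
-- ===== Notes on version B (the rewrite author's own statement) =====
-- stated objective: simpler
-- what changed: B drops A's 60-entry table-building loop and A's runtime first-letter capitalization entirely: it stores the ten stems and twelve branches as already-capitalized literals and reads them directly at (year-3)%60-1 modulo each list's length, relying on Python's floor modulo to reproduce A's negative-index case.
import Mathlib
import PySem

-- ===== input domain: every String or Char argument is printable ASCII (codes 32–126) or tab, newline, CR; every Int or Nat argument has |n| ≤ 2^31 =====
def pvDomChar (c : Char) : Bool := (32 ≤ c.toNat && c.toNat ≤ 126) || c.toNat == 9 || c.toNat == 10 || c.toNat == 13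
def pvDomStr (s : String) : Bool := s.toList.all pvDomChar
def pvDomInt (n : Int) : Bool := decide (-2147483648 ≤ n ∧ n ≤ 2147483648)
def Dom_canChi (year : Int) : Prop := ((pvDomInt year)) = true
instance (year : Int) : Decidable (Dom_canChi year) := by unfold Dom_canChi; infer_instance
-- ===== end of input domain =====

-- ===== PORT A =====
-- B changes: no 60-entry table loop and no runtime capitalization — already-capitalized word
-- literals are indexed directly by the cycle position modulo 10 and 12; objective: simpler.
-- Side effect note: both Pythons print the result; the equivalence proved here is about the return value.
-- pyUpperChar: hand port of Python str.upper on ONE character — exact for ASCII letters and for the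
-- two non-ASCII characters ('ấ', 'đ') that occur as first characters of the words A capitalizes here.
def pyUpperChar (c : Char) : Char :=
  if c = 'ấ' then 'Ấ'
  else if c = 'đ' then 'Đ'
  else if 'a' ≤ c ∧ c ≤ 'z' then Char.ofNat (c.toNat - 32)
  else c

-- capFirst w = w[0].upper() + w[1:] on a nonempty word (as List Char), as A's loop body computes it.
def capFirst (w : List Char) : List Char :=
  match w with
  | [] => []
  | c :: rest => pyUpperChar c :: rest

def canWords : List (List Char) :=
  ["giáp".toList, "ất".toList, "bính".toList, "đinh".toList, "mậu".toList,
   "kỷ".toList, "canh".toList, "tân".toList, "nhâm".toList, "quý".toList]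

def chiWords : List (List Char) :=
  ["tý".toList, "sửu".toList, "dần".toList, "mão".toList, "thìn".toList, "tị".toList,
   "ngọ".toList, "mùi".toList, "thân".toList, "dậu".toList, "tuất".toList, "hợi".toList]

-- A: build the 60-entry can_chi table with the i/j reset loop, then index it (possibly at -1).
-- The pyGet? indexings are always in range (i<10, j<12, -1 ≤ c ≤ 58 with 60 entries), so .getD never fires.
def canChi (year : Int) : Int × String :=
  let st := (PySem.List.pyRange 0 60 1).foldl
    (fun (s : Int × Int × List (List Char × List Char)) _ =>
      let i := if s.1 = 10 then 0 else s.1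
      let j := if s.2.1 = 12 then 0 else s.2.1
      let pair := (capFirst ((PySem.List.pyGet? canWords i).getD []),
                   capFirst ((PySem.List.pyGet? chiWords j).getD []))
      (i + 1, j + 1, s.2.2 ++ [pair]))
    (0, 0, [])
  let canchi := st.2.2
  let c := PySem.Int.mod (year - 3) 60 - 1
  let p := (PySem.List.pyGet? canchi c).getD ([], [])
  (year, String.ofList (p.1 ++ ' ' :: p.2))

-- ===== PORT B =====
-- B keeps the stems and branches as ALREADY-CAPITALIZED string literals and performs two direct
-- modulo lookups; Python's floor modulo wraps c = -1 to indices 9 and 11, as does PySem.Int.mod.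
-- Indexings are always in range, so .getD never fires.
def stemNames : List String :=
  ["Giáp", "Ất", "Bính", "Đinh", "Mậu", "Kỷ", "Canh", "Tân", "Nhâm", "Quý"]

def branchNames : List String :=
  ["Tý", "Sửu", "Dần", "Mão", "Thìn", "Tị", "Ngọ", "Mùi", "Thân", "Dậu", "Tuất", "Hợi"]

def canChi_alt (year : Int) : Int × String :=
  let c := PySem.Int.mod (year - 3) 60 - 1
  let name := (PySem.List.pyGet? stemNames (PySem.Int.mod c 10)).getD "" ++ " " ++
              (PySem.List.pyGet? branchNames (PySem.Int.mod c 12)).getD ""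
  (year, name)

-- ===== PRECONDITION & SPEC =====
def Spec_canChi (year : Int) (out : Int × String) : Prop := out = canChi_alt year
instance (year : Int) (out : Int × String) : Decidable (Spec_canChi year out) := by unfold Spec_canChi; infer_instance

-- ===== CLAIM (what is proved, stated in full; the proofs are below) =====
def Claim_equal_canChi : Prop := ∀ (year : Int), Dom_canChi year → Spec_canChi year (canChi year)

-- ===== LEMMAS AND PROOFS =====

-- Both ports depend on year only through m = (year-3) % 60 ∈ [0,60); fix m and check all 60 cases.
set_option maxRecDepth 8192 in
lemma canChi_eq_alt (year : Int) : canChi year = canChi_alt year := by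
  have h0 : 0 ≤ PySem.Int.mod (year - 3) 60 := PySem.Int.mod_nonneg _ (by norm_num)
  have h1 : PySem.Int.mod (year - 3) 60 < 60 := PySem.Int.mod_lt _ (by norm_num)
  obtain ⟨n, hn⟩ : ∃ n : Nat, PySem.Int.mod (year - 3) 60 = (n : Int) :=
    ⟨(PySem.Int.mod (year - 3) 60).toNat, (Int.toNat_of_nonneg h0).symm⟩
  have hlt : n < 60 := by omega
  simp only [canChi, canChi_alt, hn]
  interval_cases n <;> rfl

-- ===== VERDICT (by name: the statement is the Claim_ definition above) =====
theorem canChi_spec : Claim_equal_canChi := by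
  intro year _
  unfold Spec_canChi
  exact canChi_eq_alt year
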